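-- pv_equiv track=rewrite | github.com/tcakmak0/Cryptograph-Homeworks--CS411- | CS411-507 HW1/Q7/Q7Part2.py | backConverter
-- ===== SOURCE A (Python) =====
-- def backConverter(text, onlyAlphaText):
--     counter = 0
--     resultText = ""
--     for c in range(0, len(text)):
--         if text[c].isalpha():
--             resultText += onlyAlphaText[counter]
--             counter += 1
--         else:
--             resultText += text[c]
--
--     return resultText
-- ===== SOURCE B (Python) =====
-- def backConverter(text, onlyAlphaText):
--     # run-length decomposition: split text into maximal alphabetic / non-alphabetic
--     # runs; each alphabetic run is replaced wholesale by the next slice of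
--     # onlyAlphaText, each non-alphabetic run is copied as-is.
--     parts = []
--     rest = onlyAlphaText
--     i = 0
--     n = len(text)
--     while i < n:
--         j = i
--         if text[i].isalpha():
--             while j < n and text[j].isalpha():
--                 j += 1
--             parts.append(rest[:j - i])
--             rest = rest[j - i:]
--         else:
--             while j < n and not text[j].isalpha():
--                 j += 1
--             parts.append(text[i:j])
--         i = j
--     return ''.join(parts)
-- ===== Notes on version B (the rewrite author's own statement) =====
-- stated objective: alternative
-- what changed: B replaces A's per-character loop (running counter, char-by-char string concatenation) with a run-length decomposition: it scans text as maximal alphabetic/non-alphabetic runs, splices a whole slice of onlyAlphaText in place of each alphabetic run, copies each non-alphabetic run verbatim, and joins the parts.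
-- outside the precondition, e.g. on backConverter('ab', 'X'): A raises IndexError, B returns 'X'
import Mathlib
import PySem

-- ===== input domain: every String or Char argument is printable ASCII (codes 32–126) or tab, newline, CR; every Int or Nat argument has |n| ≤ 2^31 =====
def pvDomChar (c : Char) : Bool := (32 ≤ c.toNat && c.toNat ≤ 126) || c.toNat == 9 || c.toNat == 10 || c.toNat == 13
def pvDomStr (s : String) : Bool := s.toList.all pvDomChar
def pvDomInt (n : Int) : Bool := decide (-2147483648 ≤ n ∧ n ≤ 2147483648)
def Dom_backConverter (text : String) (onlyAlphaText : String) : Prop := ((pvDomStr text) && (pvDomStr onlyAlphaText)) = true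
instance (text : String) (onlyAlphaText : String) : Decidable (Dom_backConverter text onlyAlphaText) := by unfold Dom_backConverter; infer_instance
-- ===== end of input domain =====

-- B decomposes text into maximal alphabetic / non-alphabetic runs and splices whole slices of
-- onlyAlphaText in place of each alphabetic run, instead of A's per-character counter loop
-- (objective: alternative run-length algorithm).

-- ===== PORT A =====
-- counter = 0; resultText = ""; for c in range(0, len(text)): …   (state = (counter, resultText))
def backConverter (text : String) (onlyAlphaText : String) : String :=
  String.ofList
    (((PySem.List.pyRange 0 (text.toList.length : Int) 1).foldl
      (fun (s : Int × List Char) c =>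
        if PySem.Chars.isalpha (PySem.List.pyGetD text.toList c ' ')
        then (s.1 + 1, s.2 ++ [PySem.List.pyGetD onlyAlphaText.toList s.1 ' '])  -- onlyAlphaText[counter]: total form, Pre_ keeps counter in range
        else (s.1, s.2 ++ [PySem.List.pyGetD text.toList c ' ']))
      ((0 : Int), ([] : List Char))).2)

-- ===== PORT B =====
-- while i < n: scan the maximal run starting at i; an alphabetic run is replaced by rest[:j-i]
-- (rest = rest[j-i:]), a non-alphabetic run is copied; ''.join(parts) at the end.
-- The run scan is the takeWhile/dropWhile split; Python's clamping slices rest[:m] / rest[j-i:]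
-- and text[i:j] are List.take/List.drop (exact: all bounds are nonnegative here).
def bcGo : List Char → List Char → List Char
  | [], _ => []
  | c :: cs, rest =>
    if PySem.Chars.isalpha c then
      rest.take ((c :: cs).takeWhile PySem.Chars.isalpha).length
        ++ bcGo ((c :: cs).dropWhile PySem.Chars.isalpha) (rest.drop ((c :: cs).takeWhile PySem.Chars.isalpha).length)
    else
      (c :: cs).takeWhile (fun x => !PySem.Chars.isalpha x)
        ++ bcGo ((c :: cs).dropWhile (fun x => !PySem.Chars.isalpha x)) rest
termination_by l _ => l.length
decreasing_by
  · rename_i h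
    rw [List.dropWhile_cons_of_pos h]
    exact Nat.lt_succ_of_le (List.length_dropWhile_le _ _)
  · rename_i h
    rw [List.dropWhile_cons_of_pos (by simp [h])]
    exact Nat.lt_succ_of_le (List.length_dropWhile_le _ _)

def backConverter_alt (text : String) (onlyAlphaText : String) : String :=
  String.ofList (bcGo text.toList onlyAlphaText.toList)

-- ===== PRECONDITION & SPEC =====
-- Pre_ excludes exactly the inputs where Python A raises IndexError: onlyAlphaText shorter than the count of alphabetic characters of text.
def Pre_backConverter (text : String) (onlyAlphaText : String) : Prop :=
  text.toList.countP PySem.Chars.isalpha ≤ onlyAlphaText.toList.length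
instance (text : String) (onlyAlphaText : String) : Decidable (Pre_backConverter text onlyAlphaText) := by unfold Pre_backConverter; infer_instance
def pvWitness_backConverter : String × String := ("a1b c!", "XYZ")

def Spec_backConverter (text : String) (onlyAlphaText : String) (out : String) : Prop := out = backConverter_alt text onlyAlphaText
instance (text : String) (onlyAlphaText : String) (out : String) : Decidable (Spec_backConverter text onlyAlphaText out) := by unfold Spec_backConverter; infer_instance

-- ===== CLAIM (what is proved, stated in full; the proofs are below) =====
def Claim_equal_backConverter : Prop := ∀ (text : String) (onlyAlphaText : String), Dom_backConverter text onlyAlphaText → Pre_backConverter text onlyAlphaText → Spec_backConverter text onlyAlphaText (backConverter text onlyAlphaText)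

-- ===== LEMMAS AND PROOFS =====

-- the canonical interleaving both ports are reduced to
def pvItl : List Char → List Char → List Char
  | [], _ => []
  | c :: cs, rep =>
    if PySem.Chars.isalpha c then rep.headD ' ' :: pvItl cs rep.tail
    else c :: pvItl cs rep

-- A's loop, over the character list, with general counter and accumulator
lemma pvA_core (rep : List Char) : ∀ (cs : List Char) (k : Nat) (acc : List Char),
    cs.foldl
      (fun (s : Int × List Char) x =>
        if PySem.Chars.isalpha x
        then (s.1 + 1, s.2 ++ [PySem.List.pyGetD rep s.1 ' '])
        else (s.1, s.2 ++ [x])) ((k : Int), acc)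
    = (((k + cs.countP PySem.Chars.isalpha : Nat) : Int), acc ++ pvItl cs (rep.drop k)) := by
  intro cs
  induction cs with
  | nil => intro k acc; simp [pvItl]
  | cons c cs ih =>
    intro k acc
    by_cases h : PySem.Chars.isalpha c = true
    · simp only [List.foldl_cons, h, if_pos]
      have : ((k : Int) + 1) = ((k + 1 : Nat) : Int) := by push_cast; ring
      rw [this, ih (k + 1)]
      refine Prod.ext ?_ ?_
      · simp [h]; ring
      · simp [pvItl, h, List.tail_drop]
    · simp only [List.foldl_cons, h, Bool.false_eq_true, if_false]
      rw [ih k]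
      refine Prod.ext ?_ ?_
      · simp [h]
      · simp [pvItl, h]

lemma pvA_eq (text onlyAlphaText : String) :
    backConverter text onlyAlphaText = String.ofList (pvItl text.toList onlyAlphaText.toList) := by
  unfold backConverter
  rw [PySem.List.foldl_pyRange_zero_pyGetD' text.toList ' '
    (fun (s : Int × List Char) x =>
      if PySem.Chars.isalpha x
      then (s.1 + 1, s.2 ++ [PySem.List.pyGetD onlyAlphaText.toList s.1 ' '])
      else (s.1, s.2 ++ [x])) ((0 : Int), ([] : List Char))]
  have := pvA_core onlyAlphaText.toList text.toList 0 []
  simp only [Nat.cast_zero, List.drop_zero, List.nil_append] at this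
  rw [this]

-- pvItl eats an all-alphabetic run as a slice of the replacement list (when it is long enough)
lemma pvItl_alpha_run : ∀ (run rest rep : List Char),
    (∀ x ∈ run, PySem.Chars.isalpha x = true) → run.length ≤ rep.length →
    pvItl (run ++ rest) rep = rep.take run.length ++ pvItl rest (rep.drop run.length) := by
  intro run
  induction run with
  | nil => intro rest rep _ _; simp
  | cons r rs ih =>
    intro rest rep hall hlen
    cases rep with
    | nil => simp at hlen
    | cons h t =>
      simp only [List.cons_append, pvItl, hall r (by simp), if_pos, List.headD_cons,
        List.tail_cons, List.length_cons, List.take_succ_cons, List.drop_succ_cons]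
      rw [ih rest t (fun x hx => hall x (by simp [hx])) (by simpa using hlen)]

-- pvItl copies an alphabet-free run unchanged
lemma pvItl_nonalpha_run : ∀ (run rest rep : List Char),
    (∀ x ∈ run, PySem.Chars.isalpha x = false) →
    pvItl (run ++ rest) rep = run ++ pvItl rest rep := by
  intro run
  induction run with
  | nil => intro rest rep _; simp
  | cons r rs ih =>
    intro rest rep hall
    simp only [List.cons_append, pvItl, hall r (by simp), Bool.false_eq_true, if_false]
    rw [ih rest rep (fun x hx => hall x (by simp [hx]))]

-- B's run loop equals the canonical interleaving when the replacement list is long enough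
lemma bcGo_eq : ∀ (n : Nat) (cs rep : List Char), cs.length ≤ n →
    cs.countP PySem.Chars.isalpha ≤ rep.length → bcGo cs rep = pvItl cs rep := by
  intro n
  induction n with
  | zero =>
    intro cs rep hn _
    have : cs = [] := List.eq_nil_of_length_eq_zero (Nat.le_zero.1 hn)
    subst this; simp [bcGo, pvItl]
  | succ n ih =>
    intro cs rep hn hcnt
    cases cs with
    | nil => simp [bcGo, pvItl]
    | cons c cs =>
      by_cases h : PySem.Chars.isalpha c = true
      · rw [bcGo, if_pos h]
        have hsplit := List.takeWhile_append_dropWhile (p := PySem.Chars.isalpha) (l := c :: cs)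
        have hall : ∀ x ∈ (c :: cs).takeWhile PySem.Chars.isalpha, PySem.Chars.isalpha x = true :=
          fun x hx => List.mem_takeWhile_imp hx
        have hcntrun : ((c :: cs).takeWhile PySem.Chars.isalpha).countP PySem.Chars.isalpha
            = ((c :: cs).takeWhile PySem.Chars.isalpha).length :=
          List.countP_eq_length.2 (fun x hx => by simpa using hall x hx)
        have hcs : (c :: cs).countP PySem.Chars.isalpha
            = ((c :: cs).takeWhile PySem.Chars.isalpha).length
              + ((c :: cs).dropWhile PySem.Chars.isalpha).countP PySem.Chars.isalpha := by
          conv_lhs => rw [← hsplit]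
          rw [List.countP_append, hcntrun]
        have hrunlen : ((c :: cs).takeWhile PySem.Chars.isalpha).length ≤ rep.length := by omega
        have hdroplt : ((c :: cs).dropWhile PySem.Chars.isalpha).length ≤ n := by
          rw [List.dropWhile_cons_of_pos h]
          have := List.length_dropWhile_le (p := PySem.Chars.isalpha) (l := cs)
          simp at hn; omega
        rw [ih _ _ hdroplt (by simp; omega)]
        conv_rhs => rw [← hsplit]
        rw [pvItl_alpha_run _ _ _ hall hrunlen]
      · rw [bcGo, if_neg h]
        have hall : ∀ x ∈ (c :: cs).takeWhile (fun x => !PySem.Chars.isalpha x),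
            PySem.Chars.isalpha x = false :=
          fun x hx => by simpa using List.mem_takeWhile_imp hx
        have hsplit := List.takeWhile_append_dropWhile (p := fun x => !PySem.Chars.isalpha x) (l := c :: cs)
        have hcs : (c :: cs).countP PySem.Chars.isalpha
            = ((c :: cs).dropWhile (fun x => !PySem.Chars.isalpha x)).countP PySem.Chars.isalpha := by
          conv_lhs => rw [← hsplit]
          rw [List.countP_append, List.countP_eq_zero.2 (fun x hx => by simp [hall x hx])]
          omega
        have hdroplt : ((c :: cs).dropWhile (fun x => !PySem.Chars.isalpha x)).length ≤ n := by
          rw [List.dropWhile_cons_of_pos (by simp [h])]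
          have := List.length_dropWhile_le (p := fun x => !PySem.Chars.isalpha x) (l := cs)
          simp at hn; omega
        rw [ih _ _ hdroplt (by omega)]
        conv_rhs => rw [← hsplit]
        rw [pvItl_nonalpha_run _ _ _ hall]

lemma pvB_eq (text onlyAlphaText : String) (h : Pre_backConverter text onlyAlphaText) :
    backConverter_alt text onlyAlphaText = String.ofList (pvItl text.toList onlyAlphaText.toList) := by
  unfold backConverter_alt
  rw [bcGo_eq text.toList.length text.toList onlyAlphaText.toList le_rfl h]

-- ===== VERDICT (by name: the statement is the Claim_ definition above) =====
theorem backConverter_spec : Claim_equal_backConverter := by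
  intro text onlyAlphaText _ hpre
  unfold Spec_backConverter
  rw [pvA_eq, pvB_eq _ _ hpre]
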